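-- pv_equiv track=rewrite | github.com/lightsaber1997/inspirational_helper_code | python_script/data_object_generator.py | generate_data_object
-- ===== SOURCE A (Python) =====
-- def get_data_object_fields_as_list(list_line):
--     result = []
--
--     for line in list_line:
--         temp = []
--         # delete white space in left or right
--         line = line.strip()
--         list = line.split(" ")
--         field_name = list[0]
--         field_type = list[1]
--
--         temp.append(field_name)
--
--         field_type_in_java = "error"
--
--         if field_type == "int":
--             field_type_in_java = "int"
--         elif field_type == "timestamp":
--             field_type_in_java = "Date"
--         else:
--             field_type_in_java = "String"
--
--         temp.append(field_type_in_java)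
--         result.append(temp)
--     return result
--
-- def generate_data_object(list_line):
--     result = ""
--     indentation = ""
--     four_space = "    "
--
--     list_field = get_data_object_fields_as_list(list_line)
--
--     # add imports
--     import_date = False
--     for field in list_field:
--         name = field[0]
--         type = field[1]
--         if type == "Date":
--             import_date = True
--             break
--     if import_date:
--         result += "import java.util.Date;\n"
--
--     result += "\n"
--
--     result += "public class className {\n"
--     indentation += four_space
--
--
--     for field in list_field:
--         name = field[0]
--         type = field[1]
--
--         temp = f"{indentation}private {type} {name};\n"
--         result += temp
--     result += "\n"
--
--     for field in list_field:
--         name = field[0]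
--         type = field[1]
--
--         # add getter
--         temp = f"{indentation}public {type} get{name[0].upper() + name[1:]}() {{\n"
--         indentation += four_space
--         temp += indentation + f"return {name};\n"
--         indentation = indentation[0:-len(four_space)]
--         temp += indentation + "}\n"
--         result += temp
--
--         # add setter
--         temp = f"{indentation}public void set{name[0].upper() + name[1:]}({type} {name}) {{\n"
--         indentation += four_space
--         temp += indentation + f"this.{name} = {name};\n"
--         indentation = indentation[0:-len(four_space)]
--         temp += indentation + "}\n"
--         result += temp
--     result += "}"
--     return result
-- ===== SOURCE B (Python) =====
-- def generate_data_object(list_line):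
--     decls = []
--     methods = []
--     import_date = False
--     for line in list_line:
--         parts = line.strip().split(" ")
--         name = parts[0]
--         t = parts[1]
--         jt = "int" if t == "int" else ("Date" if t == "timestamp" else "String")
--         if jt == "Date":
--             import_date = True
--         cap = name[0].upper() + name[1:]
--         decls.append(f"    private {jt} {name};\n")
--         methods.append(
--             f"    public {jt} get{cap}() {{\n"
--             f"        return {name};\n"
--             "    }\n"
--             f"    public void set{cap}({jt} {name}) {{\n"
--             f"        this.{name} = {name};\n"
--             "    }\n"
--         )
--     return (
--         ("import java.util.Date;\n" if import_date else "")
--         + "\n"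
--         + "public class className {\n"
--         + "".join(decls)
--         + "\n"
--         + "".join(methods)
--         + "}"
--     )
-- ===== Notes on version B (the rewrite author's own statement) =====
-- stated objective: simpler
-- what changed: Replaced the intermediate [name,type] table plus three separate scans (import check, declarations, methods with indentation append/slice juggling) by a single pass over list_line that accumulates decls, methods and the import flag at once, with fixed indentation literals, assembling the result at the end.
import Mathlib
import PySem

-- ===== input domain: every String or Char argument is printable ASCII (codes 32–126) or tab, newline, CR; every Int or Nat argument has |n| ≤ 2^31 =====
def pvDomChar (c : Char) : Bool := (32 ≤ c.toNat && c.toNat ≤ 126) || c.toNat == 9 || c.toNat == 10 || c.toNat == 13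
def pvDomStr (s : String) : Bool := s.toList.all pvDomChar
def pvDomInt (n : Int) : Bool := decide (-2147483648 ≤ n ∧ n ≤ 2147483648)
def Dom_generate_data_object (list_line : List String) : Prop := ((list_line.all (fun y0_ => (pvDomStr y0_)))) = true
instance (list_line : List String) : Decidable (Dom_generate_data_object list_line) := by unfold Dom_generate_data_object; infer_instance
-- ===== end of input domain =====

-- B replaces A's intermediate [name,type] table and three separate scans by a single pass
-- that accumulates the declarations, the method blocks and the import flag at once (objective: simpler).


-- ===== PORT A =====
-- get_data_object_fields_as_list: per line strip, split(" "), take [0] and [1], map the type.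
-- list[0]/list[1] raise IndexError in Python when absent; Pre_ excludes that, so pyGetD's default is never read.
def get_data_object_fields_as_list (list_line : List String) : List (List String) :=
  list_line.foldl (fun result line =>
    let line := PySem.Str.strip line
    let lst := (PySem.Str.split? line " ").getD []   -- split? is none only for sep = "", never here
    let field_name := PySem.List.pyGetD lst 0 ""
    let field_type := PySem.List.pyGetD lst 1 ""
    let field_type_in_java :=
      if field_type == "int" then "int"
      else if field_type == "timestamp" then "Date"
      else "String"
    result ++ [[field_name, field_type_in_java]]) []

-- the import scan 'for field in list_field: … if type == "Date": import_date = True; break'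
def pvImportLoop : List (List String) → Bool
  | [] => false
  | field :: rest =>
    if PySem.List.pyGetD field 1 "" == "Date" then true else pvImportLoop rest

-- one iteration of A's declaration loop (indentation is the loop-invariant local of A)
def pvDeclStep (indentation : String) (result : String) (field : List String) : String :=
  let name := PySem.List.pyGetD field 0 ""
  let type := PySem.List.pyGetD field 1 ""
  result ++ (indentation ++ "private " ++ type ++ " " ++ name ++ ";\n")

-- one iteration of A's getter/setter loop: state is (result, indentation).
-- name[0].upper() raises on an empty name; under Pre_ the name is nonempty, the default is never read.
def pvMethodStep (st : String × String) (field : List String) : String × String :=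
  let result := st.1
  let indentation := st.2
  let name := PySem.List.pyGetD field 0 ""
  let type := PySem.List.pyGetD field 1 ""
  let cap := String.ofList [PySem.Chars.upperChar ((PySem.List.pyGet? name.toList 0).getD ' ')] ++
             PySem.Str.slice name (some 1) none
  -- getter
  let temp := indentation ++ "public " ++ type ++ " get" ++ cap ++ "() {\n"
  let indentation := indentation ++ "    "
  let temp := temp ++ indentation ++ "return " ++ name ++ ";\n"
  let indentation := PySem.Str.slice indentation none (some (-4))
  let temp := temp ++ indentation ++ "}\n"
  let result := result ++ temp
  -- setter
  let temp := indentation ++ "public void set" ++ cap ++ "(" ++ type ++ " " ++ name ++ ") {\n"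
  let indentation := indentation ++ "    "
  let temp := temp ++ indentation ++ "this." ++ name ++ " = " ++ name ++ ";\n"
  let indentation := PySem.Str.slice indentation none (some (-4))
  let temp := temp ++ indentation ++ "}\n"
  let result := result ++ temp
  (result, indentation)

def generate_data_object (list_line : List String) : String :=
  let result := ""
  let four_space := "    "
  let list_field := get_data_object_fields_as_list list_line
  let import_date := pvImportLoop list_field
  let result := if import_date then result ++ "import java.util.Date;\n" else result
  let result := result ++ "\n"
  let result := result ++ "public class className {\n"
  let indentation := "" ++ four_space
  let result := list_field.foldl (pvDeclStep indentation) result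
  let result := result ++ "\n"
  let st := list_field.foldl pvMethodStep (result, indentation)
  st.1 ++ "}"

-- ===== PORT B =====
-- one pass: per line strip/split/map the type, accumulate the decl, the method block and the import flag
def pvAltStep (st : Bool × List String × List String) (line : String) : Bool × List String × List String :=
  let parts := (PySem.Str.split? (PySem.Str.strip line) " ").getD []
  let name := PySem.List.pyGetD parts 0 ""
  let t := PySem.List.pyGetD parts 1 ""
  let jt := if t == "int" then "int" else if t == "timestamp" then "Date" else "String"
  let importDate := if jt == "Date" then true else st.1
  let cap := String.ofList [PySem.Chars.upperChar ((PySem.List.pyGet? name.toList 0).getD ' ')] ++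
             PySem.Str.slice name (some 1) none
  let decl := "    private " ++ jt ++ " " ++ name ++ ";\n"
  let meth := "    public " ++ jt ++ " get" ++ cap ++ "() {\n" ++
              "        return " ++ name ++ ";\n" ++
              "    }\n" ++
              "    public void set" ++ cap ++ "(" ++ jt ++ " " ++ name ++ ") {\n" ++
              "        this." ++ name ++ " = " ++ name ++ ";\n" ++
              "    }\n"
  (importDate, st.2.1 ++ [decl], st.2.2 ++ [meth])

def generate_data_object_alt (list_line : List String) : String :=
  let st := list_line.foldl pvAltStep (false, [], [])
  (if st.1 then "import java.util.Date;\n" else "") ++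
  "\n" ++
  "public class className {\n" ++
  PySem.Str.join "" st.2.1 ++
  "\n" ++
  PySem.Str.join "" st.2.2 ++
  "}"

-- ===== PRECONDITION & SPEC =====
-- Pre_ excludes exactly the inputs on which A raises IndexError: a line whose stripped form
-- contains no space has no second split(" ") component, so list[1] raises.
def Pre_generate_data_object (list_line : List String) : Prop :=
  ∀ line ∈ list_line, PySem.Str.isIn " " (PySem.Str.strip line) = true
instance (list_line : List String) : Decidable (Pre_generate_data_object list_line) := by
  unfold Pre_generate_data_object; infer_instance

def pvWitness_generate_data_object : List String := ["id int", "created timestamp", "name varchar"]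

def Spec_generate_data_object (list_line : List String) (out : String) : Prop := out = generate_data_object_alt list_line
instance (list_line : List String) (out : String) : Decidable (Spec_generate_data_object list_line out) := by unfold Spec_generate_data_object; infer_instance

-- ===== CLAIM (what is proved, stated in full; the proofs are below) =====
def Claim_equal_generate_data_object : Prop := ∀ (list_line : List String), Dom_generate_data_object list_line → Pre_generate_data_object list_line → Spec_generate_data_object list_line (generate_data_object list_line)

-- ===== LEMMAS AND PROOFS =====

set_option maxHeartbeats 1000000

-- the per-line [name, javaType] record A's helper builds
def pvField (line : String) : List String :=
  let line := PySem.Str.strip line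
  let lst := (PySem.Str.split? line " ").getD []
  let field_name := PySem.List.pyGetD lst 0 ""
  let field_type := PySem.List.pyGetD lst 1 ""
  let field_type_in_java :=
    if field_type == "int" then "int"
    else if field_type == "timestamp" then "Date"
    else "String"
  [field_name, field_type_in_java]

-- B's per-line pieces
def pvDecl (line : String) : String :=
  let parts := (PySem.Str.split? (PySem.Str.strip line) " ").getD []
  let name := PySem.List.pyGetD parts 0 ""
  let t := PySem.List.pyGetD parts 1 ""
  let jt := if t == "int" then "int" else if t == "timestamp" then "Date" else "String"
  "    private " ++ jt ++ " " ++ name ++ ";\n"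

def pvMeth (line : String) : String :=
  let parts := (PySem.Str.split? (PySem.Str.strip line) " ").getD []
  let name := PySem.List.pyGetD parts 0 ""
  let t := PySem.List.pyGetD parts 1 ""
  let jt := if t == "int" then "int" else if t == "timestamp" then "Date" else "String"
  let cap := String.ofList [PySem.Chars.upperChar ((PySem.List.pyGet? name.toList 0).getD ' ')] ++
             PySem.Str.slice name (some 1) none
  "    public " ++ jt ++ " get" ++ cap ++ "() {\n" ++
  "        return " ++ name ++ ";\n" ++
  "    }\n" ++
  "    public void set" ++ cap ++ "(" ++ jt ++ " " ++ name ++ ") {\n" ++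
  "        this." ++ name ++ " = " ++ name ++ ";\n" ++
  "    }\n"

def pvIsDate (line : String) : Bool := PySem.List.pyGetD (pvField line) 1 "" == "Date"

-- the same predicate in B's syntactic shape
def pvIsDateB (line : String) : Bool :=
  let parts := (PySem.Str.split? (PySem.Str.strip line) " ").getD []
  let t := PySem.List.pyGetD parts 1 ""
  let jt := if t == "int" then "int" else if t == "timestamp" then "Date" else "String"
  jt == "Date"

theorem pvPyGetD_pair0 (x y : String) : PySem.List.pyGetD [x, y] 0 "" = x := rfl

theorem pvPyGetD_pair1 (x y : String) : PySem.List.pyGetD [x, y] 1 "" = y := rfl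

theorem pvIsDateB_eq : pvIsDateB = pvIsDate := funext fun line => by
  simp only [pvIsDateB, pvIsDate, pvField, pvPyGetD_pair1]

theorem pvJoin_empty_cons (x : String) (l : List String) :
    PySem.Str.join "" (x :: l) = x ++ PySem.Str.join "" l := by
  cases l with
  | nil => simp [PySem.Str.join, PySem.Chars.join_singleton, PySem.Chars.join_nil]
  | cons b l => simp [PySem.Str.join, PySem.Chars.join_cons_cons]

theorem pvFields_eq (L : List String) :
    get_data_object_fields_as_list L = L.map pvField := by
  have h := PySem.List.foldl_append_singleton_eq_map pvField L []
  rw [List.nil_append] at h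
  exact h

theorem pvIfTrueOr (c b : Bool) : (if c then true else b) = (c || b) := by
  cases c <;> cases b <;> rfl

theorem pvImportA (L : List String) :
    pvImportLoop (L.map pvField) = L.any pvIsDate := by
  induction L with
  | nil => rfl
  | cons a l ih =>
    simp only [List.map_cons, pvImportLoop, ih, List.any_cons, pvIsDate]
    rw [pvIfTrueOr]

theorem pvDeclStepEq (init : String) (line : String) :
    pvDeclStep "    " init (pvField line) = init ++ pvDecl line := by
  apply String.toList_injective
  simp only [pvDeclStep, pvField, pvDecl, pvPyGetD_pair1]
  simp [String.toList_append]

theorem pvDeclFold (L : List String) (init : String) :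
    (L.map pvField).foldl (pvDeclStep "    ") init
      = init ++ PySem.Str.join "" (L.map pvDecl) := by
  induction L generalizing init with
  | nil => simp [PySem.Str.join, PySem.Chars.join_nil]
  | cons a l ih =>
    rw [List.map_cons, List.foldl_cons, pvDeclStepEq, ih, List.map_cons, pvJoin_empty_cons,
      ← String.append_assoc]

theorem pvMethodStepEq (init : String) (line : String) :
    pvMethodStep (init, "    ") (pvField line) = (init ++ pvMeth line, "    ") := by
  have h4 : PySem.Str.slice ("    " ++ "    ") none (some (-4)) = "    " := by decide
  refine Prod.ext ?_ ?_
  · simp only [pvMethodStep, pvField, pvMeth, pvPyGetD_pair0, pvPyGetD_pair1, h4]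
    generalize hn : PySem.List.pyGetD ((PySem.Str.split? (PySem.Str.strip line) " ").getD []) 0 "" = n
    generalize hc : String.ofList [PySem.Chars.upperChar ((PySem.List.pyGet? n.toList 0).getD ' ')] ++
      PySem.Str.slice n (some 1) none = c
    generalize ht : (if PySem.List.pyGetD ((PySem.Str.split? (PySem.Str.strip line) " ").getD []) 1 "" == "int"
      then ("int" : String)
      else if PySem.List.pyGetD ((PySem.Str.split? (PySem.Str.strip line) " ").getD []) 1 "" == "timestamp"
      then "Date" else "String") = t
    apply String.toList_injective
    simp [String.toList_append]
  · simp only [pvMethodStep, h4]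

theorem pvMethodFold (L : List String) (init : String) :
    (L.map pvField).foldl pvMethodStep (init, "    ")
      = (init ++ PySem.Str.join "" (L.map pvMeth), "    ") := by
  induction L generalizing init with
  | nil => simp [PySem.Str.join, PySem.Chars.join_nil]
  | cons a l ih =>
    rw [List.map_cons, List.foldl_cons, pvMethodStepEq, ih, List.map_cons, pvJoin_empty_cons,
      ← String.append_assoc]

theorem pvAltFold (L : List String) (b : Bool) (ds ms : List String) :
    L.foldl pvAltStep (b, ds, ms)
      = (b || L.any pvIsDateB, ds ++ L.map pvDecl, ms ++ L.map pvMeth) := by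
  induction L generalizing b ds ms with
  | nil => simp
  | cons a l ih =>
    rw [List.foldl_cons]
    have hstep : pvAltStep (b, ds, ms) a
        = ((pvIsDateB a || b), ds ++ [pvDecl a], ms ++ [pvMeth a]) := by
      simp only [pvAltStep, pvDecl, pvMeth, pvIfTrueOr, pvIsDateB]
    rw [hstep, ih, List.any_cons]
    cases hb : pvIsDateB a <;> cases b <;>
      simp only [Bool.true_or, Bool.false_or, Bool.or_true, Bool.or_false, List.map_cons,
        List.append_assoc, List.singleton_append]

theorem pvA_closed (L : List String) :
    generate_data_object L =
      (if L.any pvIsDate then "import java.util.Date;\n" else "") ++ "\n" ++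
      "public class className {\n" ++ PySem.Str.join "" (L.map pvDecl) ++ "\n" ++
      PySem.Str.join "" (L.map pvMeth) ++ "}" := by
  have hind : ("" ++ "    " : String) = "    " := rfl
  simp only [generate_data_object, pvFields_eq, pvImportA, hind, pvDeclFold, pvMethodFold]
  generalize PySem.Str.join "" (List.map pvDecl L) = D
  generalize PySem.Str.join "" (List.map pvMeth L) = M
  cases himp : L.any pvIsDate
  · rw [if_neg Bool.false_ne_true, if_neg Bool.false_ne_true]
  · rw [if_pos rfl, if_pos rfl]
    apply String.toList_injective
    simp [String.toList_append]

theorem pvB_closed (L : List String) :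
    generate_data_object_alt L =
      (if L.any pvIsDate then "import java.util.Date;\n" else "") ++ "\n" ++
      "public class className {\n" ++ PySem.Str.join "" (L.map pvDecl) ++ "\n" ++
      PySem.Str.join "" (L.map pvMeth) ++ "}" := by
  simp only [generate_data_object_alt, pvAltFold, Bool.false_or, List.nil_append]
  have hBtoA : L.any pvIsDateB = L.any pvIsDate := by rw [pvIsDateB_eq]
  cases himp : L.any pvIsDate
  · rw [hBtoA, himp]
  · rw [hBtoA, himp]

-- ===== VERDICT (by name: the statement is the Claim_ definition above) =====
theorem generate_data_object_spec : Claim_equal_generate_data_object := by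
  intro L _ _
  show generate_data_object L = generate_data_object_alt L
  rw [pvA_closed, pvB_closed]
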